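-- pv_equiv track=rewrite | github.com/Mlkurta/COMP_1353 | Projects/Compliment Search/Project2_Algorithm_Analysis_Kurta.py | alg3
-- ===== SOURCE A (Python) =====
-- def alg3(some_list: list[int])->bool:
--   """
--     Algorithm which checks if there exists some value in the list that also has its compliment
--     (inverted sign) also within the list.
--
--     It does so by setting markers at the beginning and the end of the list, and checking their sum.
--     If the sum is equal to 0, then a compliment is found.
--     Since we know the list is sorted, it can smartly walk its markers and quickly determine if there is a match at all.
--     This algorithm does not bother with individual comparisons like the binary sort: rather, it determines if there is a match
--     of any sort. The process is O(n) for the entire calculation since there must be at max n-1 comparisons. At any one time, only one index moves.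
--
--     The algorithm will take longer if the division between negative and positive integers is towards the end of the array.
--     for example, my_array = [-25, -24, -23, -22, ....., -2, 1] will take the maximum amount of time to execute for the array size.
--
--     parameters
--       some_list : list
--
--     returns
--         bool : True if that some number combo exists in the list
--     """
--   i = 0
--   j = len(some_list) - 1
--   not_found = True
--
--   if not some_list:
--     return False
--
--
--   while not_found:
--     # If the indeces cross... there is not a match
--     if i >= j:
--       return False
--
--     sum = some_list[i] + some_list[j]
--
--     # If their sum equals zero, we've found a match
--     if sum == 0:
--       not_found = False
--       return True
--
--     # If the sum is less than zero, increment the lower index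
--     elif sum < 0:
--       i += 1
--
--     # If the sum is less than zero, decrement the upper index
--     else:
--       j -= 1
--
--   return False
-- ===== SOURCE B (Python) =====
-- def alg3(some_list: list[int]) -> bool:
--     seen = set(some_list)
--     zeros = some_list.count(0)
--     if zeros >= 2:
--         return True
--     return any(x != 0 and -x in seen for x in some_list)
-- ===== Notes on version B (the rewrite author's own statement) =====
-- stated objective: idiomatic
-- what changed: Replaces the two-pointer walk over the sorted list with one-pass hash-set membership (plus a zero count so a single 0 cannot match itself), which no longer needs the list to be sorted.
-- outside the precondition, e.g. on alg3([-2, 2, -1]): A returns False, B returns True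
import Mathlib
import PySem

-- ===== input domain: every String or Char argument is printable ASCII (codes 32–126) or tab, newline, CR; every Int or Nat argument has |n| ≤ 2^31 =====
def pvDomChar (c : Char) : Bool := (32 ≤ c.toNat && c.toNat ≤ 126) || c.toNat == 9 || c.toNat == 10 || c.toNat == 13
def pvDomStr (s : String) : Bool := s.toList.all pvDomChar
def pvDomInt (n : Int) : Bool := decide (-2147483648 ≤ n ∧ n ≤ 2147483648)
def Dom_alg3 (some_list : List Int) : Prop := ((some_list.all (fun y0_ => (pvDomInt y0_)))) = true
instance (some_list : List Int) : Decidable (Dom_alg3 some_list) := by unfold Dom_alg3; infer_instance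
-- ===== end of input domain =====

-- B replaces A's two-pointer walk over a sorted list by one-pass set membership with a zero count (idiomatic; Pre_ restricts to sorted input, A's documented contract).


-- ===== PORT A =====
-- the while-loop of A: indices i, j, two-pointer walk
def alg3Loop (some_list : List Int) (i j : Int) : Bool :=
  if i ≥ j then false
  else
    let s := PySem.List.pyGetD some_list i 0 + PySem.List.pyGetD some_list j 0
    if s = 0 then true
    else if s < 0 then alg3Loop some_list (i + 1) j
    else alg3Loop some_list i (j - 1)
termination_by (j - i).toNat
decreasing_by all_goals omega

def alg3 (some_list : List Int) : Bool :=
  -- i = 0; j = len - 1; if not some_list: return False; while loop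
  if some_list = [] then false
  else alg3Loop some_list 0 ((some_list.length : Int) - 1)

-- ===== PORT B =====
def alg3_alt (some_list : List Int) : Bool :=
  let seen : PySem.Set Int := PySem.Set.ofList some_list
  let zeros := PySem.List.count some_list 0
  if zeros ≥ 2 then true
  else some_list.any (fun x => x != 0 && PySem.Set.contains seen (-x))

-- ===== PRECONDITION & SPEC =====
-- Pre_ excludes unsorted lists that contain a complement pair: A's documented contract is a
-- SORTED list ("Since we know the list is sorted"), and on such unsorted input the two-pointer
-- walk can miss the pair and return an accidental False (e.g. on [-2, 2, -1]); on every other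
-- input (sorted, or containing no complement pair at all) A and B agree and this is proved.
def Pre_alg3 (some_list : List Int) : Prop :=
  some_list.Pairwise (· ≤ ·) ∨
    (some_list.count 0 ≤ 1 ∧ ∀ x ∈ some_list, x ≠ 0 → -x ∉ some_list)
instance (some_list : List Int) : Decidable (Pre_alg3 some_list) := by unfold Pre_alg3; infer_instance

def pvWitness_alg3 : List Int := [-3, -1, 0, 2, 3]

def Spec_alg3 (some_list : List Int) (out : Bool) : Prop := out = alg3_alt some_list
instance (some_list : List Int) (out : Bool) : Decidable (Spec_alg3 some_list out) := by unfold Spec_alg3; infer_instance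

-- ===== CLAIM (what is proved, stated in full; the proofs are below) =====
def Claim_equal_alg3 : Prop := ∀ (some_list : List Int), Dom_alg3 some_list → Pre_alg3 some_list → Spec_alg3 some_list (alg3 some_list)

-- ===== LEMMAS AND PROOFS =====

-- "some complement pair exists with both indices in [i, j]"
def HasPair (l : List Int) (i j : Nat) : Prop :=
  ∃ p q : Nat, i ≤ p ∧ p < q ∧ q ≤ j ∧ q < l.length ∧ l.getD p 0 + l.getD q 0 = 0

-- sortedness as an index fact
lemma sorted_getD {l : List Int} (hs : l.Pairwise (· ≤ ·)) {p q : Nat}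
    (hpq : p ≤ q) (hq : q < l.length) : l.getD p 0 ≤ l.getD q 0 := by
  rcases Nat.lt_or_eq_of_le hpq with h | h
  · have := List.pairwise_iff_getElem.mp hs
    have hp : p < l.length := lt_trans h hq
    have := this p q hp hq h
    simpa [List.getD_eq_getElem, hp, hq] using this
  · simp [h]

lemma alg3Loop_iff (l : List Int) (hs : l.Pairwise (· ≤ ·)) :
    ∀ n i j : Nat, j - i = n → j < l.length →
      (alg3Loop l i j = true ↔ HasPair l i j) := by
  intro n
  induction n using Nat.strong_induction_on with
  | _ n ih =>
    intro i j hn hj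
    rw [alg3Loop]
    by_cases hij : (i : Int) ≥ (j : Int)
    · simp only [hij, if_true]
      constructor
      · intro h; exact absurd h (by simp)
      · rintro ⟨p, q, h1, h2, h3, _, _⟩; omega
    · have hij' : i < j := by exact_mod_cast lt_of_not_ge (fun h => hij h)
      simp only [hij, if_false]
      have hgi : PySem.List.pyGetD l (i : Int) 0 = l.getD i 0 := by
        simp [PySem.List.pyGetD_natCast]
      have hgj : PySem.List.pyGetD l (j : Int) 0 = l.getD j 0 := by
        simp [PySem.List.pyGetD_natCast]
      have hi : i < l.length := lt_trans hij' hj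
      by_cases hz : PySem.List.pyGetD l (i : Int) 0 + PySem.List.pyGetD l (j : Int) 0 = 0
      · simp only [hz, if_true]
        exact iff_of_true (by simp) ⟨i, j, le_refl _, hij', le_refl _, hj, by rw [hgi, hgj] at hz; exact hz⟩
      · simp only [hz, if_false]
        by_cases hlt : PySem.List.pyGetD l (i : Int) 0 + PySem.List.pyGetD l (j : Int) 0 < 0
        · simp only [hlt, if_true]
          have hc : ((i : Int) + 1) = ((i + 1 : Nat) : Int) := by push_cast; ring
          rw [hc, ih (j - (i+1)) (by omega) (i+1) j rfl hj]
          constructor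
          · rintro ⟨p, q, h1, h2, h3, h4, h5⟩
            exact ⟨p, q, by omega, h2, h3, h4, h5⟩
          · rintro ⟨p, q, h1, h2, h3, h4, h5⟩
            refine ⟨p, q, ?_, h2, h3, h4, h5⟩
            rcases Nat.lt_or_ge p (i+1) with hp | hp
            · -- p = i : contradiction with the sum being negative
              have hpi : p = i := by omega
              subst hpi
              have hle : l.getD q 0 ≤ l.getD j 0 := sorted_getD hs h3 hj
              rw [hgi, hgj] at hlt; omega
            · omega
        · simp only [hlt, if_false]
          have hc : ((j : Int) - 1) = ((j - 1 : Nat) : Int) := by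
            have : 1 ≤ j := by omega
            push_cast [this]; ring
          rw [hc, ih ((j-1) - i) (by omega) i (j-1) rfl (by omega)]
          constructor
          · rintro ⟨p, q, h1, h2, h3, h4, h5⟩
            exact ⟨p, q, h1, h2, by omega, h4, h5⟩
          · rintro ⟨p, q, h1, h2, h3, h4, h5⟩
            refine ⟨p, q, h1, h2, ?_, h4, h5⟩
            rcases Nat.lt_or_ge q j with hq | hq
            · omega
            · -- q = j : contradiction with the sum being positive
              have hqj : q = j := by omega
              subst hqj
              have hle : l.getD i 0 ≤ l.getD p 0 := sorted_getD hs (by omega) (by omega)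
              rw [hgi, hgj] at hz hlt
              omega

-- unordered complement-pair existence
def PairExists (l : List Int) : Prop :=
  ∃ p q : Nat, p < q ∧ q < l.length ∧ l.getD p 0 + l.getD q 0 = 0

lemma two_le_count_of_two_idx (l : List Int) (a : Int) :
    ∀ p q : Nat, p < q → q < l.length → l.getD p 0 = a → l.getD q 0 = a →
      2 ≤ l.count a := by
  induction l with
  | nil => intro p q _ hq _ _; simp at hq
  | cons x xs ih =>
    intro p q hpq hq hp hqa
    rcases p with _ | p
    · -- x = a and xs contains a at q-1
      simp at hp; subst hp
      rcases q with _ | q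
      · omega
      · have hmem : x ∈ xs := by
          have hq' : q < xs.length := by simpa using hq
          have : xs.getD q 0 = x := by simpa using hqa
          rw [← this]; rw [List.getD_eq_getElem _ _ hq']; exact List.getElem_mem hq'
        have h1 := List.one_le_count_iff.mpr hmem
        rw [List.count_cons_self]; omega
    · rcases q with _ | q
      · omega
      · have := ih p q (by omega) (by simpa using hq) (by simpa using hp) (by simpa using hqa)
        have hle : xs.count a ≤ (x :: xs).count a := by
          rw [List.count_cons]; split <;> omega
        omega

lemma two_idx_of_two_le_count (l : List Int) (a : Int) (h : 2 ≤ l.count a) :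
    ∃ p q : Nat, p < q ∧ q < l.length ∧ l.getD p 0 = a ∧ l.getD q 0 = a := by
  induction l with
  | nil => simp at h
  | cons x xs ih =>
    by_cases hx : x = a
    · subst hx
      have hmem : x ∈ xs := by
        by_contra hmem
        have : xs.count x = 0 := List.count_eq_zero.mpr hmem
        simp [List.count_cons_self, this] at h
      rcases List.mem_iff_getElem.mp hmem with ⟨q, hq, hqa⟩
      exact ⟨0, q + 1, by omega, by simpa using hq,
        by simp, by simpa using (List.getD_eq_getElem xs 0 hq).trans hqa⟩
    · have h' : 2 ≤ xs.count a := by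
        rw [List.count_cons] at h
        simp only [beq_iff_eq] at h
        rw [if_neg hx] at h
        omega
      rcases ih h' with ⟨p, q, h1, h2, h3, h4⟩
      exact ⟨p + 1, q + 1, by omega, by simpa using h2, by simpa using h3, by simpa using h4⟩

lemma memForm_iff_pairExists (l : List Int) :
    (2 ≤ l.count 0 ∨ ∃ x ∈ l, x ≠ 0 ∧ -x ∈ l) ↔ PairExists l := by
  constructor
  · rintro (h | ⟨x, hx, hx0, hnx⟩)
    · rcases two_idx_of_two_le_count l 0 h with ⟨p, q, h1, h2, h3, h4⟩
      exact ⟨p, q, h1, h2, by rw [h3, h4]; ring⟩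
    · rcases List.mem_iff_getElem.mp hx with ⟨p, hp, hpv⟩
      rcases List.mem_iff_getElem.mp hnx with ⟨q, hq, hqv⟩
      have hne : p ≠ q := by
        intro h; subst h
        have : x = -x := hpv.symm.trans hqv
        omega
      rcases Nat.lt_or_ge p q with h | h
      · exact ⟨p, q, h, hq, by
          rw [List.getD_eq_getElem _ _ hp, List.getD_eq_getElem _ _ hq, hpv, hqv]; ring⟩
      · exact ⟨q, p, by omega, hp, by
          rw [List.getD_eq_getElem _ _ hp, List.getD_eq_getElem _ _ hq, hpv, hqv]; ring⟩
  · rintro ⟨p, q, h1, h2, h3⟩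
    have hp : p < l.length := by omega
    by_cases hz : l.getD p 0 = 0
    · left
      exact two_le_count_of_two_idx l 0 p q h1 h2 hz (by omega)
    · right
      refine ⟨l.getD p 0, ?_, hz, ?_⟩
      · rw [List.getD_eq_getElem _ _ hp]; exact List.getElem_mem hp
      · have : -l.getD p 0 = l.getD q 0 := by omega
        rw [this, List.getD_eq_getElem _ _ h2]; exact List.getElem_mem h2

lemma alg3_alt_iff (l : List Int) : alg3_alt l = true ↔ (2 ≤ l.count 0 ∨ ∃ x ∈ l, x ≠ 0 ∧ -x ∈ l) := by
  unfold alg3_alt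
  by_cases h2 : PySem.List.count l 0 ≥ 2
  · simp only [h2, if_true]
    rw [PySem.List.count_eq] at h2
    simp only [true_iff]
    left; exact_mod_cast h2
  · simp only [h2, if_false]
    rw [PySem.List.count_eq] at h2
    constructor
    · intro h
      rcases List.any_eq_true.mp h with ⟨x, hx, hp⟩
      simp only [Bool.and_eq_true, bne_iff_ne, ne_eq] at hp
      right
      refine ⟨x, hx, hp.1, ?_⟩
      have := (PySem.Set.contains_iff _ _).mp hp.2
      simpa [PySem.Set.mem_ofList] using this
    · rintro (h | ⟨x, hx, hx0, hnx⟩)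
      · exact absurd h (by omega)
      · apply List.any_eq_true.mpr
        refine ⟨x, hx, ?_⟩
        simp only [Bool.and_eq_true, bne_iff_ne, ne_eq]
        refine ⟨hx0, ?_⟩
        exact (PySem.Set.contains_iff _ _).mpr (by simpa [PySem.Set.mem_ofList] using hnx)

-- even on unsorted input, if A's walk answers true it has exhibited a real complement pair
lemma alg3Loop_true_pair (l : List Int) :
    ∀ n i j : Nat, j - i = n → j < l.length → alg3Loop l i j = true → PairExists l := by
  intro n
  induction n using Nat.strong_induction_on with
  | _ n ih =>
    intro i j hn hj h
    rw [alg3Loop] at h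
    by_cases hij : (i : Int) ≥ (j : Int)
    · simp [hij] at h
    · have hij' : i < j := by exact_mod_cast lt_of_not_ge (fun hc => hij hc)
      simp only [hij, if_false] at h
      by_cases hz : PySem.List.pyGetD l (i : Int) 0 + PySem.List.pyGetD l (j : Int) 0 = 0
      · refine ⟨i, j, hij', hj, ?_⟩
        have hgi : PySem.List.pyGetD l (i : Int) 0 = l.getD i 0 := by
          simp [PySem.List.pyGetD_natCast]
        have hgj : PySem.List.pyGetD l (j : Int) 0 = l.getD j 0 := by
          simp [PySem.List.pyGetD_natCast]
        rw [hgi, hgj] at hz; exact hz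
      · simp only [hz, if_false] at h
        by_cases hlt : PySem.List.pyGetD l (i : Int) 0 + PySem.List.pyGetD l (j : Int) 0 < 0
        · simp only [hlt, if_true] at h
          have hc : ((i : Int) + 1) = ((i + 1 : Nat) : Int) := by push_cast; ring
          rw [hc] at h
          exact ih (j - (i + 1)) (by omega) (i + 1) j rfl hj h
        · simp only [hlt, if_false] at h
          have hc : ((j : Int) - 1) = ((j - 1 : Nat) : Int) := by
            have : 1 ≤ j := by omega
            push_cast [this]; ring
          rw [hc] at h
          exact ih ((j - 1) - i) (by omega) i (j - 1) rfl (by omega) h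

lemma alg3_true_pair (l : List Int) (h : alg3 l = true) : PairExists l := by
  unfold alg3 at h
  by_cases hnil : l = []
  · simp [hnil] at h
  · simp only [hnil, if_false] at h
    have hlen : 1 ≤ l.length := List.length_pos_iff.mpr hnil
    have hc : ((l.length : Int) - 1) = ((l.length - 1 : Nat) : Int) := by push_cast [hlen]; ring
    rw [hc, show ((0 : Int)) = ((0 : Nat) : Int) from rfl] at h
    exact alg3Loop_true_pair l (l.length - 1 - 0) 0 (l.length - 1) rfl (by omega) h

lemma alg3_iff (l : List Int) (hs : l.Pairwise (· ≤ ·)) : alg3 l = true ↔ PairExists l := by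
  unfold alg3
  by_cases hnil : l = []
  · subst hnil
    simp only [if_true]
    constructor
    · intro h; simp at h
    · rintro ⟨p, q, _, h2, _⟩; simp at h2
  · simp only [hnil, if_false]
    have hlen : 1 ≤ l.length := List.length_pos_iff.mpr hnil
    have hc : ((l.length : Int) - 1) = ((l.length - 1 : Nat) : Int) := by push_cast [hlen]; ring
    rw [hc]
    rw [show ((0 : Int)) = ((0 : Nat) : Int) from rfl]
    rw [alg3Loop_iff l hs (l.length - 1 - 0) 0 (l.length - 1) rfl (by omega)]
    unfold HasPair PairExists
    constructor
    · rintro ⟨p, q, _, h2, _, h4, h5⟩; exact ⟨p, q, h2, h4, h5⟩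
    · rintro ⟨p, q, h2, h4, h5⟩; exact ⟨p, q, Nat.zero_le _, h2, by omega, h4, h5⟩

-- ===== VERDICT (by name: the statement is the Claim_ definition above) =====
theorem alg3_spec : Claim_equal_alg3 := by
  intro l _ hpre
  unfold Spec_alg3
  rcases hpre with hs | ⟨hz, hnp⟩
  · rw [Bool.eq_iff_iff, alg3_iff l hs, alg3_alt_iff l, memForm_iff_pairExists]
  · have hnopair : ¬ PairExists l := by
      rw [← memForm_iff_pairExists]
      rintro (h | ⟨x, hx, hx0, hnx⟩)
      · omega
      · exact hnp x hx hx0 hnx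
    have hb : alg3_alt l = false := by
      cases hb : alg3_alt l
      · rfl
      · exact absurd ((memForm_iff_pairExists l).mp ((alg3_alt_iff l).mp hb)) hnopair
    have ha : alg3 l = false := by
      cases ha : alg3 l
      · rfl
      · exact absurd (alg3_true_pair l ha) hnopair
    rw [ha, hb]
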